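-- pv_equiv track=rewrite | github.com/dmitrykopytine/github-summary | model_call.py | _find_waterline
-- ===== SOURCE A (Python) =====
-- def _find_waterline(truncatable: list[tuple[int, int]], target_total: int) -> int:
--     if target_total <= 0:
--         return 0
--     lengths = sorted(length for _, length in truncatable)
--     n = len(lengths)
--     cumulative = 0
--     for i, length in enumerate(lengths):
--         remaining = n - i
--         space_if_level = cumulative + length * remaining
--         if space_if_level >= target_total:
--             return (target_total - cumulative) // remaining
--         cumulative += length
--     return lengths[-1]
-- ===== SOURCE B (Python) =====
-- def _find_waterline(truncatable: list[tuple[int, int]], target_total: int) -> int: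
--     if target_total <= 0:
--         return 0
--     lengths = [length for _, length in truncatable]
--     hi = lengths[0]
--     total = 0
--     for length in lengths:
--         if length > hi:
--             hi = length
--         total += length
--     if total < target_total:
--         return hi
--     lo = 0
--     while lo < hi:
--         mid = (lo + hi + 1) // 2
--         if sum(min(length, mid) for length in lengths) <= target_total:
--             lo = mid
--         else:
--             hi = mid - 1
--     return lo
-- ===== Notes on version B (the rewrite author's own statement) =====
-- stated objective: alternative
-- what changed: Replaces A's sort-then-linear-scan with prefix sums by a sortless single pass computing max and total plus a binary search over fill levels for the largest w with sum(min(length,w)) <= target.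
import Mathlib
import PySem

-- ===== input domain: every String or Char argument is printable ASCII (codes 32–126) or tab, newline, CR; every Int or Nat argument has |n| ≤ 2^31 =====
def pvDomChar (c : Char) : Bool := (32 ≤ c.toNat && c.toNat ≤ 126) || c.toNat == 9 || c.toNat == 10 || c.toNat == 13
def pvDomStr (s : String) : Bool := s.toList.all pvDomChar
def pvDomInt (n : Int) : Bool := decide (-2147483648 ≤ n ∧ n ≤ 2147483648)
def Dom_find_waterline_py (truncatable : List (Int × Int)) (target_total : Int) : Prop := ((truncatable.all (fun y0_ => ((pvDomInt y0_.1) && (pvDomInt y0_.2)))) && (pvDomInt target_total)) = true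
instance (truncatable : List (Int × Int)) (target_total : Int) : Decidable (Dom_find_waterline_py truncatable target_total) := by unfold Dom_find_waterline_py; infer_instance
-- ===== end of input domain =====

-- B replaces A's sort + prefix-sum scan by a sortless max/total pass and a binary search
-- over fill levels; equal return values proved on Pre_ (A raises IndexError on an empty
-- list with positive target, B raises there too; Pre_ excludes exactly those inputs).


-- ===== PORT A =====
-- the for-loop over enumerate(lengths) with early return: `remaining = n - i` is the
-- length of the unprocessed suffix, so we recurse on that suffix carrying `cumulative`;
-- `some v` = the early `return v`, `none` = loop fell through
def goA (target : Int) : List Int → Int → Option Int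
  | [], _ => none
  | l :: rest, cum =>
      let remaining : Int := (rest.length : Int) + 1
      if cum + l * remaining ≥ target then
        some (PySem.Int.floordiv (target - cum) remaining)
      else goA target rest (cum + l)

def find_waterline_py (truncatable : List (Int × Int)) (target_total : Int) : Int :=
  if target_total ≤ 0 then 0
  else
    let lengths := PySem.List.sorted (truncatable.map (·.2)) (fun x => x) false
    match goA target_total lengths 0 with
    | some v => v
    | none => PySem.List.pyGetD lengths (-1) 0  -- lengths[-1]; IndexError (empty) excluded by Pre_

-- ===== PORT B =====
-- sum(min(length, mid) for length in lengths)
def waterSum (lengths : List Int) (mid : Int) : Int :=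
  (lengths.map (fun l => min l mid)).sum

-- the while-loop of B: invariant-free transliteration, recursing while lo < hi
def bsearchB (lengths : List Int) (target : Int) (lo hi : Int) : Int :=
  if h : lo < hi then
    let mid := PySem.Int.floordiv (lo + hi + 1) 2
    if waterSum lengths mid ≤ target then bsearchB lengths target mid hi
    else bsearchB lengths target lo (mid - 1)
  else lo
termination_by (hi - lo).toNat
decreasing_by
  · have hb := PySem.Int.floordiv_two_mid_bounds (lo := lo + 1) (hi := hi) (by omega)
    have : lo + 1 + hi = lo + hi + 1 := by omega
    rw [this] at hb
    omega
  · have hb := PySem.Int.floordiv_two_mid_bounds (lo := lo + 1) (hi := hi) (by omega)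
    have : lo + 1 + hi = lo + hi + 1 := by omega
    rw [this] at hb
    omega

def find_waterline_py_alt (truncatable : List (Int × Int)) (target_total : Int) : Int :=
  if target_total ≤ 0 then 0
  else
    let lengths := truncatable.map (·.2)
    let hi0 := PySem.List.pyGetD lengths 0 0  -- lengths[0]; IndexError (empty) excluded by Pre_
    -- one pass computing (running max, running total)
    let p := lengths.foldl (fun (p : Int × Int) l => (if l > p.1 then l else p.1, p.2 + l)) (hi0, 0)
    if p.2 < target_total then p.1
    else bsearchB lengths target_total 0 p.1

-- ===== PRECONDITION & SPEC =====
-- Pre_ excludes the empty list with positive target, on which both A (lengths[-1]) and B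
-- (lengths[0]) raise IndexError.
def Pre_find_waterline_py (truncatable : List (Int × Int)) (target_total : Int) : Prop :=
  target_total ≤ 0 ∨ truncatable ≠ []
instance (truncatable : List (Int × Int)) (target_total : Int) : Decidable (Pre_find_waterline_py truncatable target_total) := by unfold Pre_find_waterline_py; infer_instance

def pvWitness_find_waterline_py : (List (Int × Int)) × Int := ([(1, 3), (2, 5)], 6)

def Spec_find_waterline_py (truncatable : List (Int × Int)) (target_total : Int) (out : Int) : Prop := out = find_waterline_py_alt truncatable target_total
instance (truncatable : List (Int × Int)) (target_total : Int) (out : Int) : Decidable (Spec_find_waterline_py truncatable target_total out) := by unfold Spec_find_waterline_py; infer_instance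

-- ===== CLAIM (what is proved, stated in full; the proofs are below) =====
def Claim_equal_find_waterline_py : Prop := ∀ (truncatable : List (Int × Int)) (target_total : Int), Dom_find_waterline_py truncatable target_total → Pre_find_waterline_py truncatable target_total → Spec_find_waterline_py truncatable target_total (find_waterline_py truncatable target_total)

-- ===== LEMMAS AND PROOFS =====

-- waterSum is monotone in the level
lemma waterSum_mono (L : List Int) {w w' : Int} (h : w ≤ w') :
    waterSum L w ≤ waterSum L w' := by
  unfold waterSum
  apply List.sum_le_sum
  intro l _
  exact min_le_min le_rfl h

-- waterSum only depends on the multiset of lengths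
lemma waterSum_perm {L L' : List Int} (h : L.Perm L') (w : Int) :
    waterSum L w = waterSum L' w := by
  unfold waterSum
  exact List.Perm.sum_eq (h.map _)

lemma waterSum_append (L L' : List Int) (w : Int) :
    waterSum (L ++ L') w = waterSum L w + waterSum L' w := by
  unfold waterSum; simp

lemma waterSum_eq_sum (L : List Int) (w : Int) (h : ∀ x ∈ L, x ≤ w) :
    waterSum L w = L.sum := by
  unfold waterSum
  congr 1
  apply List.map_congr_left ?_ |>.trans (List.map_id _)
  intro x hx; exact min_eq_left (h x hx)

lemma waterSum_eq_mul (L : List Int) (w : Int) (h : ∀ x ∈ L, w ≤ x) :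
    waterSum L w = w * L.length := by
  induction L with
  | nil => simp [waterSum]
  | cons x t ih =>
    have hx : min x w = w := min_eq_right (h x (by simp))
    simp only [waterSum, List.map_cons, List.sum_cons] at *
    rw [hx, ih (fun y hy => h y (by simp [hy]))]
    simp only [List.length_cons]
    push_cast; ring

-- the "answer" predicate: the level both programs return
def AnsP (L : List Int) (T M v : Int) : Prop :=
  waterSum L v ≤ T ∧ v ≤ M ∧ (v = M ∨ T < waterSum L (v + 1))

lemma AnsP_unique {L : List Int} {T M v v' : Int}
    (h : AnsP L T M v) (h' : AnsP L T M v') : v = v' := by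
  obtain ⟨hf, hm, hd⟩ := h
  obtain ⟨hf', hm', hd'⟩ := h'
  by_contra hne
  rcases lt_or_gt_of_ne hne with hlt | hlt
  · rcases hd with rfl | hd
    · omega
    · have := waterSum_mono L (show v + 1 ≤ v' by omega)
      omega
  · rcases hd' with rfl | hd'
    · omega
    · have := waterSum_mono L (show v' + 1 ≤ v by omega)
      omega

-- B's binary search returns the answer
lemma bsearchB_go (L : List Int) (T M : Int) :
    ∀ (n : Nat) (lo hi : Int), (hi - lo).toNat ≤ n →
      waterSum L lo ≤ T → lo ≤ hi → hi ≤ M → (hi = M ∨ T < waterSum L (hi + 1)) →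
      AnsP L T M (bsearchB L T lo hi) := by
  intro n
  induction n with
  | zero =>
    intro lo hi hn h1 h2 h3 h4
    have heq : lo = hi := by omega
    subst heq
    rw [bsearchB, dif_neg (lt_irrefl lo)]
    exact ⟨h1, h3, h4⟩
  | succ n ih =>
    intro lo hi hn h1 h2 h3 h4
    by_cases hlt : lo < hi
    · have hb := PySem.Int.floordiv_two_mid_bounds (lo := lo + 1) (hi := hi) (by omega)
      have hassoc : lo + 1 + hi = lo + hi + 1 := by omega
      rw [hassoc] at hb
      rw [bsearchB, dif_pos hlt]
      simp only []
      by_cases hfeas : waterSum L (PySem.Int.floordiv (lo + hi + 1) 2) ≤ T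
      · rw [if_pos hfeas]
        exact ih _ hi (by omega) hfeas (by omega) h3 h4
      · rw [if_neg hfeas]
        refine ih lo _ (by omega) h1 (by omega) (by omega) (Or.inr ?_)
        have : PySem.Int.floordiv (lo + hi + 1) 2 - 1 + 1 = PySem.Int.floordiv (lo + hi + 1) 2 := by omega
        rw [this]
        omega
    · have heq : lo = hi := by omega
      subst heq
      rw [bsearchB, dif_neg (lt_irrefl lo)]
      exact ⟨h1, h3, h4⟩

lemma bsearchB_correct (L : List Int) (T M lo hi : Int)
    (h1 : waterSum L lo ≤ T) (h2 : lo ≤ hi) (h3 : hi ≤ M) (h4 : hi = M ∨ T < waterSum L (hi + 1)) :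
    AnsP L T M (bsearchB L T lo hi) :=
  bsearchB_go L T M (hi - lo).toNat lo hi le_rfl h1 h2 h3 h4

-- A's loop: invariant and result
lemma goA_spec (T : Int) (S : List Int)
    (hS : S.Pairwise (· ≤ ·)) (M : Int) (hM : ∀ y ∈ S, y ≤ M) (hMmem : M ∈ S) :
    ∀ (rest pre : List Int) (cum : Int), S = pre ++ rest → cum = pre.sum →
      (∀ x ∈ pre, x * (rest.length : Int) < T - cum) → cum < T →
      (goA T rest cum = none → S.sum < T) ∧
      (∀ v, goA T rest cum = some v → AnsP S T M v) := by
  intro rest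
  induction rest with
  | nil =>
    intro pre cum hsplit hcum _ hcumlt
    constructor
    · intro _
      rw [hsplit, List.append_nil, ← hcum]
      exact hcumlt
    · intro v hv
      simp [goA] at hv
  | cons h tail ih =>
    intro pre cum hsplit hcum hinv hcumlt
    -- ordering facts from the sorted split
    have hsplitP : (pre ++ h :: tail).Pairwise (· ≤ ·) := hsplit ▸ hS
    obtain ⟨hpreP, hrestP, hcross⟩ := List.pairwise_append.mp hsplitP
    have hhtail : ∀ y ∈ tail, h ≤ y := (List.pairwise_cons.mp hrestP).1
    set rem : Int := (tail.length : Int) + 1 with hremdef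
    have hrem : (0 : Int) < rem := by positivity
    by_cases htrig : cum + h * rem ≥ T
    · -- early return
      set v := PySem.Int.floordiv (T - cum) rem with hvdef
      set r := PySem.Int.mod (T - cum) rem with hrdef
      have hvr : v * rem + r = T - cum := PySem.Int.floordiv_mul_add_mod (T - cum) rem
      have hr0 : 0 ≤ r := PySem.Int.mod_nonneg _ hrem
      have hrlt : r < rem := PySem.Int.mod_lt _ hrem
      have hxv : ∀ x ∈ pre, x ≤ v := by
        intro x hx
        have h1 : x * rem < T - cum := by
          have := hinv x hx
          simpa [hremdef] using this
        have h2 : x * rem < (v + 1) * rem := by nlinarith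
        have := lt_of_mul_lt_mul_right h2 (le_of_lt hrem)
        omega
      have hvh : v ≤ h := by
        have h2 : v * rem ≤ h * rem := by nlinarith
        exact le_of_mul_le_mul_right h2 hrem
      have hvtail : ∀ y ∈ h :: tail, v ≤ y := by
        intro y hy
        rcases List.mem_cons.mp hy with rfl | hy
        · exact hvh
        · exact hvh.trans (hhtail y hy)
      have hWv : waterSum S v = cum + v * rem := by
        rw [hsplit, waterSum_append, waterSum_eq_sum pre v hxv,
          waterSum_eq_mul (h :: tail) v hvtail, ← hcum]
        simp [hremdef]
      have hgoal : AnsP S T M v := by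
        refine ⟨by omega, ?_, ?_⟩
        · exact hvh.trans (hM h (hsplit ▸ List.mem_append_right pre List.mem_cons_self))
        · -- v ≤ M
          by_cases hvM : v = M
          · exact Or.inl hvM
          · right
            have hvltM : v < M := by
              rcases lt_or_eq_of_le (hvh.trans (hM h (hsplit ▸ List.mem_append_right pre List.mem_cons_self))) with hlt | he
              · exact hlt
              · exact absurd he hvM
            have hMrest : M ∈ h :: tail := by
              have := hsplit ▸ hMmem
              rcases List.mem_append.mp this with hp | hr
              · exact absurd (hxv M hp) (by omega)
              · exact hr
            have hpre1 : ∀ x ∈ pre, x ≤ v + 1 := fun x hx => by have := hxv x hx; omega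
            have hWS : waterSum S (v + 1) = cum + waterSum (h :: tail) (v + 1) := by
              rw [hsplit, waterSum_append, waterSum_eq_sum pre (v + 1) hpre1, ← hcum]
            rcases lt_or_eq_of_le hvh with hvlth | hveqh
            · -- v < h: every suffix element is ≥ v + 1
              have hall : ∀ y ∈ h :: tail, v + 1 ≤ y := by
                intro y hy
                rcases List.mem_cons.mp hy with rfl | hy
                · omega
                · have := hhtail y hy; omega
              have : waterSum (h :: tail) (v + 1) = (v + 1) * rem := by
                rw [waterSum_eq_mul (h :: tail) (v + 1) hall]
                simp [hremdef]
              rw [hWS, this]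
              have hd : (v + 1) * rem = v * rem + rem := by ring
              omega
            · -- v = h: trigger was an exact fill, r = 0
              have hreq : T - cum = v * rem := by
                have h1 : T - cum ≤ h * rem := by omega
                rw [← hveqh] at h1
                omega
              have hr0' : r = 0 := by omega
              have hlt : v * ((h :: tail).length : Int) < waterSum (h :: tail) (v + 1) := by
                have hsum := List.sum_lt_sum (l := h :: tail)
                  (f := fun _ => v) (g := fun y => min y (v + 1))
                  (h₁ := by
                    intro y hy
                    show v ≤ min y (v + 1)
                    exact le_min (hvtail y hy) (by omega))
                  (h₂ := ⟨M, hMrest, by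
                    show v < min M (v + 1)
                    have : min M (v + 1) = v + 1 := min_eq_right (by omega)
                    rw [this]; omega⟩)
                calc v * ((h :: tail).length : Int)
                    = ((h :: tail).map (fun _ => v)).sum := by
                      rw [PySem.List.sum_map_const_int]; ring
                  _ < waterSum (h :: tail) (v + 1) := hsum
              have hlen : ((h :: tail).length : Int) = rem := by
                simp [hremdef]
              rw [hWS]
              rw [hlen] at hlt
              omega
      constructor
      · intro hnone
        exfalso
        simp only [goA] at hnone
        rw [if_pos (by simpa [hremdef] using htrig)] at hnone
        exact Option.some_ne_none _ hnone
      · intro w hw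
        simp only [goA] at hw
        rw [if_pos (by simpa [hremdef] using htrig)] at hw
        have : w = v := by
          simp [hvdef, hremdef] at hw ⊢
          omega
        rwa [this]
    · -- no trigger: continue the loop
      rw [ge_iff_le, not_le] at htrig
      have hstep : goA T (h :: tail) cum = goA T tail (cum + h) := by
        simp only [goA]
        rw [if_neg (by simpa [hremdef] using not_le.mpr htrig)]
      have hsplit' : S = (pre ++ [h]) ++ tail := by
        rw [hsplit, List.append_assoc, List.singleton_append]
      have hcum' : cum + h = (pre ++ [h]).sum := by
        rw [List.sum_append, List.sum_cons, List.sum_nil, ← hcum]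
        ring
      have hinv' : ∀ x ∈ pre ++ [h], x * ((tail.length : Int)) < T - (cum + h) := by
        intro x hx
        have hhstep : h * (tail.length : Int) < T - (cum + h) := by
          have : h * rem = h * (tail.length : Int) + h := by rw [hremdef]; ring
          omega
        rcases List.mem_append.mp hx with hp | hsing
        · have hxh : x ≤ h := hcross x hp h List.mem_cons_self
          have : x * (tail.length : Int) ≤ h * (tail.length : Int) :=
            mul_le_mul_of_nonneg_right hxh (by positivity)
          omega
        · have : x = h := by simpa using hsing
          rw [this]; exact hhstep
      have hcumlt' : cum + h < T := by
        rcases le_or_gt 0 h with hpos | hneg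
        · have : h * 1 ≤ h * rem := mul_le_mul_of_nonneg_left (by omega) hpos
          omega
        · omega
      have := ih (pre ++ [h]) (cum + h) hsplit' hcum' hinv' hcumlt'
      rw [hstep]
      exact this

-- the last element of a ≤-sorted list bounds every element
lemma le_getLast_of_pairwise : ∀ (S : List Int) (hne : S ≠ []),
    S.Pairwise (· ≤ ·) → ∀ y ∈ S, y ≤ S.getLast hne := by
  intro S
  induction S with
  | nil => intro hne; exact absurd rfl hne
  | cons a t ih =>
    intro hne hp y hy
    rcases List.mem_cons.mp hy with rfl | hyt
    · cases t with
      | nil => simp [List.getLast]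
      | cons b u =>
        have hmem : (b :: u).getLast (by simp) ∈ b :: u := List.getLast_mem _
        rw [List.getLast_cons (by simp)]
        exact (List.pairwise_cons.mp hp).1 _ hmem
    · have ht : t ≠ [] := List.ne_nil_of_mem hyt
      rw [List.getLast_cons ht]
      exact ih ht (List.pairwise_cons.mp hp).2 y hyt

-- B's single pass is a running max paired with a running sum
lemma foldl_maxsum (L : List Int) : ∀ (a s : Int),
    L.foldl (fun (p : Int × Int) l => (if l > p.1 then l else p.1, p.2 + l)) (a, s)
      = (L.foldl max a, s + L.sum) := by
  induction L with
  | nil => intro a s; simp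
  | cons x t ih =>
    intro a s
    have hmax : (if x > a then x else a) = max a x := by
      rcases lt_or_ge a x with hlt | hge
      · rw [if_pos hlt, max_eq_right hlt.le]
      · rw [if_neg (not_lt.mpr hge), max_eq_left hge]
    simp only [List.foldl_cons, List.sum_cons, hmax, ih]
    congr 1
    ring

lemma waterSum_zero_nonpos (L : List Int) : waterSum L 0 ≤ 0 := by
  unfold waterSum
  calc (L.map (fun l => min l 0)).sum
      ≤ (L.map (fun _ => (0 : Int))).sum :=
        List.sum_le_sum (fun l _ => min_le_right l 0)
    _ = 0 := by rw [PySem.List.sum_map_const_int]; ring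

-- ===== VERDICT (by name: the statement is the Claim_ definition above) =====
theorem find_waterline_py_spec : Claim_equal_find_waterline_py := by
  unfold Claim_equal_find_waterline_py
  intro trunc T _ hPre
  unfold Spec_find_waterline_py
  by_cases hT0 : T ≤ 0
  · simp [find_waterline_py, find_waterline_py_alt, if_pos hT0]
  · have hT : 1 ≤ T := by omega
    have hne : trunc ≠ [] := by
      rcases hPre with h | h
      · exact absurd h hT0
      · exact h
    have hLne : trunc.map (·.2) ≠ [] := by simpa using hne
    obtain ⟨x, t, hL⟩ := List.exists_cons_of_ne_nil hLne
    -- B's side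
    set M : Int := (x :: t).foldl max x with hMdef
    have hMub : ∀ y ∈ x :: t, y ≤ M := (PySem.List.le_foldl_max (x :: t) x).2
    have hMmemL : M ∈ x :: t := by
      rcases PySem.List.foldl_max_mem (x :: t) x with he | hm
      · rw [hMdef, he]; exact List.mem_cons_self
      · exact hm
    have hBeval : find_waterline_py_alt trunc T =
        (if (x :: t).sum < T then M else bsearchB (x :: t) T 0 M) := by
      simp only [find_waterline_py_alt, if_neg hT0, hL, PySem.List.pyGetD_zero_cons,
        foldl_maxsum, zero_add, ← hMdef]
    -- A's side
    set S : List Int := PySem.List.sorted (x :: t) (fun y => y) false with hSdef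
    have hSperm : S.Perm (x :: t) := PySem.List.sorted_perm _ _ _
    have hSpair : S.Pairwise (· ≤ ·) := PySem.List.sorted_pairwise _ _
    have hSne : S ≠ [] := by
      intro hnil
      rw [hnil] at hSperm
      exact List.cons_ne_nil x t hSperm.symm.eq_nil
    have hMS : ∀ y ∈ S, y ≤ M := fun y hy => hMub y (hSperm.mem_iff.mp hy)
    have hMmemS : M ∈ S := hSperm.mem_iff.mpr hMmemL
    have hsumS : S.sum = (x :: t).sum := hSperm.sum_eq
    have hAeval : find_waterline_py trunc T =
        (match goA T S 0 with
         | some v => v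
         | none => PySem.List.pyGetD S (-1) 0) := by
      simp only [find_waterline_py, if_neg hT0, hL, ← hSdef]
    have hA := goA_spec T S hSpair M hMS hMmemS S [] 0 rfl rfl (by simp) (by omega)
    rw [hAeval, hBeval]
    cases hgo : goA T S 0 with
    | none =>
      have hlt : (x :: t).sum < T := by rw [← hsumS]; exact hA.1 hgo
      rw [if_pos hlt]
      rw [PySem.List.pyGetD_neg_one S 0 hSne]
      have h1 : S.getLast hSne ≤ M := hMS _ (List.getLast_mem hSne)
      have h2 : M ≤ S.getLast hSne := le_getLast_of_pairwise S hSne hSpair M hMmemS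
      show S.getLast hSne = M
      omega
    | some v =>
      have hAnsS : AnsP S T M v := hA.2 v hgo
      have hAnsL : AnsP (x :: t) T M v := by
        unfold AnsP at hAnsS ⊢
        rw [← waterSum_perm hSperm v, ← waterSum_perm hSperm (v + 1)]
        exact hAnsS
      by_cases hlt : (x :: t).sum < T
      · rw [if_pos hlt]
        have hAnsM : AnsP (x :: t) T M M :=
          ⟨by rw [waterSum_eq_sum _ _ hMub]; omega, le_rfl, Or.inl rfl⟩
        exact AnsP_unique hAnsL hAnsM
      · rw [if_neg hlt]
        have hM0 : 0 ≤ M := by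
          by_contra hMneg
          have hms : waterSum (x :: t) M ≤ waterSum (x :: t) 0 :=
            waterSum_mono _ (by omega)
          rw [waterSum_eq_sum _ _ hMub] at hms
          have := waterSum_zero_nonpos (x :: t)
          omega
        have hbs : AnsP (x :: t) T M (bsearchB (x :: t) T 0 M) :=
          bsearchB_correct (x :: t) T M 0 M
            (by have := waterSum_zero_nonpos (x :: t); omega) hM0 le_rfl (Or.inl rfl)
        exact AnsP_unique hAnsL hbs
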